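-- pv_equiv track=rewrite | github.com/pypi-data/pypi-mirror-398 | packages/codestory-cli/codestory_cli-0.1.3-py3-none-any.whl/codestory/core/utils/patch.py | truncate_patch
-- ===== SOURCE A (Python) =====
-- def truncate_patch(
--     patch: str | bytes,
--     max_length: int = 200,
--     truncate_line: str = "[TRUNCATED: remaining patch omitted]",
-- ) -> str:
--     """Truncates a patch string to a maximum length, adding ellipsis if necessary."""
--     if len(patch) <= max_length:
--         return patch
--
--     lines = patch.splitlines()
--     sum_length = 0
--     i = 0
--
--     while sum_length < (max_length - len(truncate_line)) and i < len(lines):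
--         sum_length += len(lines[i]) + 1  # +1 for the newline character
--         i += 1
--
--     return "\n".join(lines[:i] + [truncate_line]) if i < len(lines) else patch
-- ===== SOURCE B (Python) =====
-- from bisect import bisect_left
-- from itertools import accumulate
--
--
-- def truncate_patch(
--     patch,
--     max_length=200,
--     truncate_line="[TRUNCATED: remaining patch omitted]",
-- ):
--     """Truncates a patch string to a maximum length, adding ellipsis if necessary."""
--     if len(patch) <= max_length:
--         return patch
--
--     lines = patch.splitlines()
--     # cum[k] = total length of the first k lines (each counted with its newline)
--     cum = list(accumulate((len(line) + 1 for line in lines), initial=0))[:-1]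
--     i = bisect_left(cum, max_length - len(truncate_line))
--
--     return "\n".join(lines[:i] + [truncate_line]) if i < len(lines) else patch
-- ===== Notes on version B (the rewrite author's own statement) =====
-- stated objective: alternative
-- what changed: Replaced A's incremental while-loop (running sum + index) by building a cumulative line-length table with itertools.accumulate and locating the cut index with bisect.bisect_left (binary search).
import Mathlib
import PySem

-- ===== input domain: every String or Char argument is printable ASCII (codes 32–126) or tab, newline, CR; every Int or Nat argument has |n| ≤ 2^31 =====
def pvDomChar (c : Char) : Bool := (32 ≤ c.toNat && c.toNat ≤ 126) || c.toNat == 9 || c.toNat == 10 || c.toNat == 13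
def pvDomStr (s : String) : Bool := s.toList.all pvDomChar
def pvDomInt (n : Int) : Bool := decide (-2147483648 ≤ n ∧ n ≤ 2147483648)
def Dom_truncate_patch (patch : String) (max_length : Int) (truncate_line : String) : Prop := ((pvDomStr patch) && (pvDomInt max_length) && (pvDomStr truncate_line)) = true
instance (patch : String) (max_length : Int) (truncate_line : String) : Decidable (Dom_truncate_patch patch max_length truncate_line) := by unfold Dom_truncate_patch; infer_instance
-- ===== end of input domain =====

-- B replaces A's incremental while-loop by a cumulative-length table plus a binary search
-- (bisect_left); objective: alternative decomposition, same cost class on the str domain.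

-- ===== PORT A =====
-- A's while-loop: running sum and index, advancing while sum < max_length - len(truncate_line).
def truncLoopA (lines : List String) (t : Int) (sum : Int) (i : Nat) : Nat :=
  if h : sum < t ∧ i < lines.length then
    -- lines[i] is in range here (guard), so getD is exact
    truncLoopA lines t (sum + PySem.Str.len (lines.getD i "") + 1) (i + 1)
  else i
termination_by lines.length - i
decreasing_by omega

def truncate_patch (patch : String) (max_length : Int) (truncate_line : String) : String :=
  if PySem.Str.len patch ≤ max_length then patch
  else
    let lines := PySem.Str.splitlines patch
    let i := truncLoopA lines (max_length - PySem.Str.len truncate_line) 0 0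
    -- lines[:i] with i a Nat loop counter (≥ 0), so List.take is exact
    if i < lines.length then PySem.Str.join "\n" (lines.take i ++ [truncate_line]) else patch

-- ===== PORT B =====
-- list(accumulate((len(line)+1 for line in lines), initial=0))[:-1]  — scanl then drop last
def cumTable (lines : List String) : List Int :=
  (List.scanl (fun s line => s + PySem.Str.len line + 1) 0 lines).dropLast

def truncate_patch_alt (patch : String) (max_length : Int) (truncate_line : String) : String :=
  if PySem.Str.len patch ≤ max_length then patch
  else
    let lines := PySem.Str.splitlines patch
    let cum := cumTable lines
    let i := PySem.List.bisectLeft cum (max_length - PySem.Str.len truncate_line)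
    if i < lines.length then PySem.Str.join "\n" (lines.take i ++ [truncate_line]) else patch

-- ===== PRECONDITION & SPEC =====
def Spec_truncate_patch (patch : String) (max_length : Int) (truncate_line : String) (out : String) : Prop := out = truncate_patch_alt patch max_length truncate_line
instance (patch : String) (max_length : Int) (truncate_line : String) (out : String) : Decidable (Spec_truncate_patch patch max_length truncate_line out) := by unfold Spec_truncate_patch; infer_instance

-- ===== CLAIM (what is proved, stated in full; the proofs are below) =====
def Claim_equal_truncate_patch : Prop := ∀ (patch : String) (max_length : Int) (truncate_line : String), Dom_truncate_patch patch max_length truncate_line → Spec_truncate_patch patch max_length truncate_line (truncate_patch patch max_length truncate_line)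

-- ===== LEMMAS AND PROOFS =====

-- cumAt ls i = combined length (with newline) of the first i lines = A's running sum at index i
def cumAt (ls : List String) (i : Nat) : Int :=
  ((ls.take i).map (fun l => PySem.Str.len l + 1)).sum

-- structural version of the cumulative table, convenient for induction
def pvCum (s : Int) (ls : List String) : List Int :=
  match ls with
  | [] => []
  | l :: ls => s :: pvCum (s + PySem.Str.len l + 1) ls

theorem len_nonneg (s : String) : 0 ≤ PySem.Str.len s := by
  rw [PySem.Str.len_eq]; exact Int.natCast_nonneg _

theorem pvCum_length (ls : List String) : ∀ s, (pvCum s ls).length = ls.length := by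
  induction ls with
  | nil => intro s; rfl
  | cons l ls ih => intro s; simp [pvCum, ih]

theorem cumTable_eq_pvCum (ls : List String) : ∀ s,
    (List.scanl (fun a line => a + PySem.Str.len line + 1) s ls).dropLast = pvCum s ls := by
  induction ls with
  | nil => intro s; rfl
  | cons l ls ih =>
      intro s
      rw [List.scanl_cons, List.dropLast_cons_of_ne_nil, pvCum, ih]
      intro h
      have := congrArg List.length h
      simp [List.length_scanl] at this

theorem pvCum_getElem? (ls : List String) : ∀ s j, j < ls.length →
    (pvCum s ls)[j]? = some (s + cumAt ls j) := by
  induction ls with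
  | nil => intro s j hj; simp at hj
  | cons l ls ih =>
      intro s j hj
      cases j with
      | zero => simp [pvCum, cumAt]
      | succ j =>
          have hj' : j < ls.length := by simpa using hj
          simp only [pvCum, List.getElem?_cons_succ, ih _ j hj']
          congr 1
          simp [cumAt, List.take_succ_cons]
          ring

theorem pvCum_lb (ls : List String) : ∀ s x, x ∈ pvCum s ls → s ≤ x := by
  induction ls with
  | nil => intro s x hx; simp [pvCum] at hx
  | cons l ls ih =>
      intro s x hx
      simp only [pvCum, List.mem_cons] at hx
      rcases hx with rfl | hx
      · exact le_refl _
      · have := ih _ x hx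
        have := len_nonneg l
        omega

theorem pvCum_pairwise (ls : List String) : ∀ s,
    (pvCum s ls).Pairwise (fun a b => a ≤ b) := by
  induction ls with
  | nil => intro s; simp [pvCum]
  | cons l ls ih =>
      intro s
      refine List.pairwise_cons.mpr ⟨?_, ih _⟩
      intro x hx
      have := pvCum_lb ls _ x hx
      have := len_nonneg l
      omega

theorem cumAt_succ (ls : List String) (i : Nat) (hi : i < ls.length) :
    cumAt ls (i + 1) = cumAt ls i + PySem.Str.len (ls.getD i "") + 1 := by
  have h1 : ls.take (i + 1) = ls.take i ++ [ls[i]] := by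
    rw [List.take_add_one]
    simp [List.getElem?_eq_getElem hi]
  rw [cumAt, h1, List.map_append, List.sum_append, List.getD_eq_getElem ls _ hi, cumAt]
  simp
  ring

-- the while-loop, started consistently (sum = cumAt i), lands exactly at bisect_left's index
theorem loop_eq_bisect (lines : List String) (t : Int) :
    ∀ d i, i ≤ PySem.List.bisectLeft (pvCum 0 lines) t →
      PySem.List.bisectLeft (pvCum 0 lines) t - i ≤ d →
      truncLoopA lines t (cumAt lines i) i = PySem.List.bisectLeft (pvCum 0 lines) t := by
  have hlen := pvCum_length lines 0
  obtain ⟨hb_le, hb_lt, hb_ge⟩ :=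
    PySem.List.bisectLeft_spec (pvCum 0 lines) t (pvCum_pairwise lines 0)
  set b := PySem.List.bisectLeft (pvCum 0 lines) t with hb
  have hcum : ∀ j, j < lines.length → (pvCum 0 lines)[j]? = some (cumAt lines j) := by
    intro j hj
    have := pvCum_getElem? lines 0 j hj
    simpa using this
  intro d
  induction d with
  | zero =>
      intro i hi hle
      have : i = b := by omega
      subst this
      rw [truncLoopA]
      split
      · next h =>
          exfalso
          have hbn : b < lines.length := h.2
          have hjx : b < (pvCum 0 lines).length := by omega
          have := hb_ge b hjx (le_refl _)
          have hget : (pvCum 0 lines)[b] = cumAt lines b := by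
            have := hcum b hbn
            rw [List.getElem?_eq_getElem hjx] at this
            exact Option.some.inj this
          rw [hget] at this
          omega
      · rfl
  | succ d ih =>
      intro i hi hle
      by_cases hib : i = b
      · subst hib
        rw [truncLoopA]
        split
        · next h =>
            exfalso
            have hbn : b < lines.length := h.2
            have hjx : b < (pvCum 0 lines).length := by omega
            have := hb_ge b hjx (le_refl _)
            have hget : (pvCum 0 lines)[b] = cumAt lines b := by
              have := hcum b hbn
              rw [List.getElem?_eq_getElem hjx] at this
              exact Option.some.inj this
            rw [hget] at this
            omega
        · rfl
      · have hilt : i < b := by omega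
        have hin : i < lines.length := by omega
        have hjx : i < (pvCum 0 lines).length := by omega
        have hlt := hb_lt i hjx hilt
        have hget : (pvCum 0 lines)[i] = cumAt lines i := by
          have := hcum i hin
          rw [List.getElem?_eq_getElem hjx] at this
          exact Option.some.inj this
        rw [hget] at hlt
        rw [truncLoopA]
        rw [dif_pos ⟨hlt, hin⟩]
        rw [← cumAt_succ lines i hin]
        exact ih (i + 1) (by omega) (by omega)

theorem loop_bisect (lines : List String) (t : Int) :
    truncLoopA lines t 0 0 = PySem.List.bisectLeft (cumTable lines) t := by
  have h0 : cumAt lines 0 = 0 := by simp [cumAt]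
  rw [cumTable, cumTable_eq_pvCum]
  calc truncLoopA lines t 0 0
      = truncLoopA lines t (cumAt lines 0) 0 := by rw [h0]
    _ = PySem.List.bisectLeft (pvCum 0 lines) t :=
        loop_eq_bisect lines t _ 0 (Nat.zero_le _) (le_refl _)

-- ===== VERDICT (by name: the statement is the Claim_ definition above) =====
theorem truncate_patch_spec : Claim_equal_truncate_patch := by
  intro patch max_length truncate_line _
  unfold Spec_truncate_patch truncate_patch truncate_patch_alt
  split
  · rfl
  · simp only
    rw [loop_bisect]
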